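-- pv_equiv track=rewrite | github.com/Hughger/pytorch-cifar100-DelayCalculationFinshedRefine | utils_mine/DelayCalculation.py | find_optimal_rectangle_dimensions
-- ===== SOURCE A (Python) =====
-- import math
--
-- def find_optimal_rectangle_dimensions(length_unit, width_unit, core_number, input_channel, output_channel):
--     """
--     找到最佳的长方形边长，使得用最少的长方形来填充一个指定区域。
--
--     Args:
--         length_unit (int): 长方形长度的单位。
--         width_unit (int): 长方形宽度的单位。
--         core_number (int): 用于计算总面积的核数。
--         input_channel (int): 目标区域的长度。
--         output_channel (int): 目标区域的宽度。
--
--     Returns: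
--         tuple: 包含最佳长方形长度、宽度和所需数量的元组 (length, width, count)。
--                如果找不到合适的边长，返回 None。
--     """
--     # 计算总面积
--     total_area = length_unit * width_unit * core_number
--
--     # 初始化最佳解
--     best_length = None
--     best_width = None
--     min_count = float('inf')
--
--     # 遍历所有可能的 k 和 m
--     for k in range(1, core_number + 1):
--         if core_number % k == 0:
--             for m in range(1,math.ceil(core_number / k) + 1):
--                 length = k * length_unit
--                 width = m * width_unit
--
--                 # # 检查面积是否匹配
--                 # if length * width <= total_area:
--                 #     continue
--
--                 # 计算所需长方形数量
--                 num_length = math.ceil(input_channel / length)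
--                 num_width = math.ceil(output_channel / width)
--                 count = num_length * num_width
--
--                 # 更新最佳解
--                 if count < min_count:
--                     min_count = count
--                     best_length = k
--                     best_width = m
--
--     # 返回结果
--     if best_length is not None and best_width is not None:
--         return best_length, best_width, min_count
--     else:
--         return None
-- ===== SOURCE B (Python) =====
-- import math
--
-- def _divisors_sorted(n):
--     # all divisors of n (n >= 1) in increasing order, via trial division up to sqrt(n)
--     small = []
--     large = []
--     i = 1
--     while i * i <= n:
--         if n % i == 0:
--             small.append(i)
--             if i != n // i:
--                 large.append(n // i)
--         i += 1
--     return small + large[::-1]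
--
-- def find_optimal_rectangle_dimensions(length_unit, width_unit, core_number, input_channel, output_channel):
--     if core_number < 1:
--         return None
--     candidates = [(k, m, -(-input_channel // (k * length_unit)) * -(-output_channel // (m * width_unit)))
--                   for k in _divisors_sorted(core_number)
--                   for m in range(1, core_number // k + 1)]
--     return min(candidates, key=lambda t: t[2])
-- ===== Notes on version B (the rewrite author's own statement) =====
-- stated objective: alternative
-- what changed: B enumerates only the divisors of core_number by trial division up to sqrt(core_number) instead of scanning every k in 1..core_number with a modulus test, hoists the per-k ceil division out of the inner loop, builds the full candidate list (k, m, count), and takes the first minimum with min(key=count) instead of A's running strict-min accumulator.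
import Mathlib
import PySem

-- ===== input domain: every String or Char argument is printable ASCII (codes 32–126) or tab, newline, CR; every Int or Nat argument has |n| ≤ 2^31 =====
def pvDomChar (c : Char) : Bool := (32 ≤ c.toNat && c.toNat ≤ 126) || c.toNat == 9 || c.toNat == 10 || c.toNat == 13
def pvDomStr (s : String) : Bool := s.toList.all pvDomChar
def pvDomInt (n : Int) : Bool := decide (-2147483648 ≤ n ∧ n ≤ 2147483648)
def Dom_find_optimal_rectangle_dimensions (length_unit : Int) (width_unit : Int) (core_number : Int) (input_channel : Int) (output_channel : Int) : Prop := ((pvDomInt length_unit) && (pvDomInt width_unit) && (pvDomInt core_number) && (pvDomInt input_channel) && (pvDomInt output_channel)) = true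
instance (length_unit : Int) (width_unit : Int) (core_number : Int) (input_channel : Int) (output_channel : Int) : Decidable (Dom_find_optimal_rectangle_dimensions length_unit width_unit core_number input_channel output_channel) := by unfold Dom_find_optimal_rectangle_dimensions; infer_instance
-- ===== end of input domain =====

-- B replaces A's scan of all k in 1..core_number and its running strict-min accumulator by an
-- O(√core_number) divisor enumeration plus generate-candidates-then-min; same return value (alternative
-- decomposition, not claimed faster).

-- math.ceil(a / b) ported as exact integer ceiling division: exact on Dom, since for |a| ≤ 2^31 < 2^53
-- the float quotient a/b cannot round across an integer boundary (error ≤ |a|/|b|·2⁻⁵³ < 1/|b|).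
def pyCeilDiv (a b : Int) : Int := -(PySem.Int.floordiv (-a) b)

-- ===== PORT A =====
def find_optimal_rectangle_dimensions (length_unit : Int) (width_unit : Int) (core_number : Int) (input_channel : Int) (output_channel : Int) : Option (Int × Int × Int) :=
  let _total_area := length_unit * width_unit * core_number
  -- state = (best_length, best_width, min_count); none encodes best_length is None / min_count = inf
  (PySem.List.pyRange 1 (core_number + 1)).foldl (fun s k =>
    if PySem.Int.mod core_number k == 0 then
      (PySem.List.pyRange 1 (pyCeilDiv core_number k + 1)).foldl (fun s m =>
        let length := k * length_unit
        let width := m * width_unit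
        let num_length := pyCeilDiv input_channel length
        let num_width := pyCeilDiv output_channel width
        let count := num_length * num_width
        match s with
        | none => some (k, m, count)
        | some (bl, bw, mc) => if count < mc then some (k, m, count) else some (bl, bw, mc)) s
    else s) none

-- ===== PORT B =====
-- _divisors_sorted's while loop (i increases while i*i ≤ n)
def pvDivisorsAux (n : Int) (i : Int) (small : List Int) (large : List Int) : List Int :=
  if h : i * i ≤ n then
    pvDivisorsAux n (i + 1)
      (if PySem.Int.mod n i == 0 then small ++ [i] else small)
      (if PySem.Int.mod n i == 0 && !(i == PySem.Int.floordiv n i) then large ++ [PySem.Int.floordiv n i] else large)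
  else small ++ large.reverse
termination_by (n + 1 - i).toNat
decreasing_by
  have hin : i ≤ n := by nlinarith [sq_nonneg i, h]
  omega

def find_optimal_rectangle_dimensions_alt (length_unit : Int) (width_unit : Int) (core_number : Int) (input_channel : Int) (output_channel : Int) : Option (Int × Int × Int) :=
  if core_number < 1 then none
  else
    let candidates := (pvDivisorsAux core_number 1 [] []).flatMap (fun k =>
      (PySem.List.pyRange 1 (PySem.Int.floordiv core_number k + 1)).map (fun m =>
        (k, m, pyCeilDiv input_channel (k * length_unit) * pyCeilDiv output_channel (m * width_unit))))
    PySem.List.min? candidates (fun t => t.2.2)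

-- ===== PRECONDITION & SPEC =====
-- Pre_ excludes exactly the inputs where Python A raises ZeroDivisionError: core_number ≥ 1 with
-- length_unit = 0 or width_unit = 0 (B raises there too).
def Pre_find_optimal_rectangle_dimensions (length_unit : Int) (width_unit : Int) (core_number : Int) (input_channel : Int) (output_channel : Int) : Prop := core_number < 1 ∨ (length_unit ≠ 0 ∧ width_unit ≠ 0)
instance (length_unit : Int) (width_unit : Int) (core_number : Int) (input_channel : Int) (output_channel : Int) : Decidable (Pre_find_optimal_rectangle_dimensions length_unit width_unit core_number input_channel output_channel) := by unfold Pre_find_optimal_rectangle_dimensions; infer_instance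
def pvWitness_find_optimal_rectangle_dimensions : Int × Int × Int × Int × Int := (3, 7, 6, 10, 20)

def Spec_find_optimal_rectangle_dimensions (length_unit : Int) (width_unit : Int) (core_number : Int) (input_channel : Int) (output_channel : Int) (out : Option (Int × Int × Int)) : Prop := out = find_optimal_rectangle_dimensions_alt length_unit width_unit core_number input_channel output_channel
instance (length_unit : Int) (width_unit : Int) (core_number : Int) (input_channel : Int) (output_channel : Int) (out : Option (Int × Int × Int)) : Decidable (Spec_find_optimal_rectangle_dimensions length_unit width_unit core_number input_channel output_channel out) := by unfold Spec_find_optimal_rectangle_dimensions; infer_instance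

-- ===== CLAIM (what is proved, stated in full; the proofs are below) =====
def Claim_equal_find_optimal_rectangle_dimensions : Prop := ∀ (length_unit : Int) (width_unit : Int) (core_number : Int) (input_channel : Int) (output_channel : Int), Dom_find_optimal_rectangle_dimensions length_unit width_unit core_number input_channel output_channel → Pre_find_optimal_rectangle_dimensions length_unit width_unit core_number input_channel output_channel → Spec_find_optimal_rectangle_dimensions length_unit width_unit core_number input_channel output_channel (find_optimal_rectangle_dimensions length_unit width_unit core_number input_channel output_channel)

-- ===== LEMMAS AND PROOFS =====

-- value of floor division at an exact multiple
theorem pvfd_eq {n k c : Int} (hk : 0 < k) (h : n = k * c) : PySem.Int.floordiv n k = c := by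
  rw [PySem.Int.floordiv_eq_iff_of_pos hk]
  constructor <;> nlinarith

theorem pvfd_mul {n k : Int} (hk : 0 < k) (hd : k ∣ n) : PySem.Int.floordiv n k * k = n := by
  obtain ⟨c, rfl⟩ := hd
  rw [pvfd_eq hk rfl]; ring

theorem pvceil_eq_floordiv {n k : Int} (hk : 0 < k) (hd : k ∣ n) : pyCeilDiv n k = PySem.Int.floordiv n k := by
  obtain ⟨c, rfl⟩ := hd
  unfold pyCeilDiv
  rw [pvfd_eq hk rfl, show -(k*c) = k * (-c) by ring, pvfd_eq hk rfl, neg_neg]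

def pvSmall (n i : Int) : List Int :=
  (PySem.List.pyRange i (n + 1)).filter (fun j => decide (j * j ≤ n) && (PySem.Int.mod n j == 0))

def pvLarge (n i : Int) : List Int :=
  ((PySem.List.pyRange i (n + 1)).filter
    (fun j => decide (j * j ≤ n) && (PySem.Int.mod n j == 0) && !(j == PySem.Int.floordiv n j))).map
    (fun j => PySem.Int.floordiv n j)

theorem pvDivisorsAux_inv (n : Int) (fuel : Nat) :
    ∀ (i : Int) (small large : List Int), (n + 1 - i).toNat ≤ fuel → 1 ≤ i →
      pvDivisorsAux n i small large = small ++ pvSmall n i ++ (large ++ pvLarge n i).reverse := by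
  induction fuel with
  | zero =>
    intro i small large hfuel hi
    have hni : n + 1 ≤ i := by omega
    have hgt : ¬ (i * i ≤ n) := by nlinarith
    rw [pvDivisorsAux, dif_neg hgt]
    have hr : PySem.List.pyRange i (n+1) = [] := PySem.List.pyRange_one_eq_nil (by omega)
    simp [pvSmall, pvLarge, hr]
  | succ f ih =>
    intro i small large hfuel hi
    rw [pvDivisorsAux]
    by_cases h : i * i ≤ n
    · rw [dif_pos h]
      have hin : i ≤ n := by nlinarith
      have hcons : PySem.List.pyRange i (n+1) = i :: PySem.List.pyRange (i+1) (n+1) :=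
        PySem.List.pyRange_one_cons (by omega)
      rw [ih (i+1) _ _ (by omega) (by omega)]
      by_cases hdvd : (PySem.Int.mod n i == 0) = true
      · by_cases hne : (i == PySem.Int.floordiv n i) = true
        · simp [pvSmall, pvLarge, hcons, h, hdvd, hne]
        · simp [pvSmall, pvLarge, hcons, h, hdvd, hne]
      · simp [pvSmall, pvLarge, hcons, h, hdvd]
    · rw [dif_neg h]
      have hs : pvSmall n i = [] := by
        rw [pvSmall, List.filter_eq_nil_iff]
        intro j hj
        have hji : i ≤ j := (PySem.List.mem_pyRange_one.mp hj).1
        have : ¬ (j * j ≤ n) := by nlinarith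
        simp [this]
      have hl : pvLarge n i = [] := by
        rw [pvLarge]
        rw [List.filter_eq_nil_iff.mpr ?_]
        · simp
        · intro j hj
          have hji : i ≤ j := (PySem.List.mem_pyRange_one.mp hj).1
          have : ¬ (j * j ≤ n) := by nlinarith
          simp [this]
      simp [hs, hl]

def pvDlist (n : Int) : List Int := (PySem.List.pyRange 1 (n + 1)).filter (fun k => PySem.Int.mod n k == 0)

-- facts about members
theorem pvSmall_mem {n x : Int} (hx : x ∈ pvSmall n 1) : 1 ≤ x ∧ x * x ≤ n ∧ x ∣ n := by
  rw [pvSmall, List.mem_filter] at hx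
  obtain ⟨hr, hc⟩ := hx
  have h1 := (PySem.List.mem_pyRange_one.mp hr).1
  simp only [Bool.and_eq_true, decide_eq_true_eq, beq_iff_eq] at hc
  exact ⟨h1, hc.1, (PySem.Int.mod_eq_zero_iff_dvd n x).mp hc.2⟩

theorem pvLarge_mem {n y : Int} (hn : 1 ≤ n) (hy : y ∈ pvLarge n 1) :
    1 ≤ y ∧ n < y * y ∧ y ∣ n ∧ y ≤ n := by
  rw [pvLarge, List.mem_map] at hy
  obtain ⟨j, hj, rfl⟩ := hy
  rw [List.mem_filter] at hj
  obtain ⟨hr, hc⟩ := hj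
  have h1 := (PySem.List.mem_pyRange_one.mp hr).1
  simp only [Bool.and_eq_true, decide_eq_true_eq, beq_iff_eq, Bool.not_eq_true', beq_eq_false_iff_ne, ne_eq] at hc
  obtain ⟨⟨hjj, hdvd⟩, hne⟩ := hc
  have hdvd' := (PySem.Int.mod_eq_zero_iff_dvd n j).mp hdvd
  set d := PySem.Int.floordiv n j with hd
  have hmul : d * j = n := pvfd_mul (by omega) hdvd'
  have hdpos : 1 ≤ d := by nlinarith
  have hjd : j < d := by
    rcases lt_or_ge j d with h | h
    · exact h
    · exfalso; exact hne (le_antisymm (by nlinarith) (by nlinarith))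
  refine ⟨hdpos, by nlinarith, ⟨j, by linarith [hmul]; ⟩, by nlinarith⟩

theorem pvDlist_mem {n x : Int} : x ∈ pvDlist n ↔ 1 ≤ x ∧ x ≤ n ∧ x ∣ n := by
  rw [pvDlist, List.mem_filter, PySem.List.mem_pyRange_one]
  simp only [beq_iff_eq, PySem.Int.mod_eq_zero_iff_dvd]
  constructor
  · rintro ⟨⟨h1, h2⟩, h3⟩; exact ⟨h1, by omega, h3⟩
  · rintro ⟨h1, h2, h3⟩; exact ⟨⟨h1, by omega⟩, h3⟩

theorem pvdivs_eq (n : Int) (hn : 1 ≤ n) : pvSmall n 1 ++ (pvLarge n 1).reverse = pvDlist n := by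
  -- filter-membership facts for the large side, at the filtered-range level
  have hLmem : ∀ j ∈ (PySem.List.pyRange 1 (n + 1)).filter
      (fun j => decide (j * j ≤ n) && (PySem.Int.mod n j == 0) && !(j == PySem.Int.floordiv n j)),
      1 ≤ j ∧ j * j ≤ n ∧ j ∣ n := by
    intro j hj
    rw [List.mem_filter] at hj
    obtain ⟨hr, hc⟩ := hj
    simp only [Bool.and_eq_true, decide_eq_true_eq, beq_iff_eq] at hc
    exact ⟨(PySem.List.mem_pyRange_one.mp hr).1, hc.1.1, (PySem.Int.mod_eq_zero_iff_dvd n j).mp hc.1.2⟩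
  -- Pairwise (<) on the left-hand list
  have hpairL : List.Pairwise (· < ·) (pvSmall n 1 ++ (pvLarge n 1).reverse) := by
    rw [List.pairwise_append]
    refine ⟨List.Pairwise.filter _ (PySem.List.pairwise_lt_pyRange_one 1 (n+1)), ?_, ?_⟩
    · rw [List.pairwise_reverse, pvLarge, List.pairwise_map]
      refine List.Pairwise.imp_of_mem ?_ (List.Pairwise.filter _ (PySem.List.pairwise_lt_pyRange_one 1 (n+1)))
      intro a b ha hb hab
      obtain ⟨ha1, haa, hadvd⟩ := hLmem a ha
      obtain ⟨hb1, hbb, hbdvd⟩ := hLmem b hb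
      have hma := pvfd_mul (by omega) hadvd
      have hmb := pvfd_mul (by omega) hbdvd
      have hda : 1 ≤ PySem.Int.floordiv n a := by nlinarith
      have hdb : 1 ≤ PySem.Int.floordiv n b := by nlinarith
      nlinarith
    · intro x hx y hy
      obtain ⟨hx1, hxx, _⟩ := pvSmall_mem hx
      rw [List.mem_reverse] at hy
      obtain ⟨hy1, hyy, _, _⟩ := pvLarge_mem hn hy
      nlinarith
  -- Pairwise (<) on the right-hand list
  have hpairR : List.Pairwise (· < ·) (pvDlist n) :=
    List.Pairwise.filter _ (PySem.List.pairwise_lt_pyRange_one 1 (n+1))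
  -- Nodup on both sides
  have hnodupL : (pvSmall n 1 ++ (pvLarge n 1).reverse).Nodup := hpairL.nodup
  have hnodupR : (pvDlist n).Nodup := hpairR.nodup
  -- same membership
  have hmem : ∀ a, a ∈ pvSmall n 1 ++ (pvLarge n 1).reverse ↔ a ∈ pvDlist n := by
    intro a
    rw [List.mem_append, List.mem_reverse, pvDlist_mem]
    constructor
    · rintro (h | h)
      · obtain ⟨h1, h2, h3⟩ := pvSmall_mem h
        exact ⟨h1, by nlinarith, h3⟩
      · obtain ⟨h1, h2, h3, h4⟩ := pvLarge_mem hn h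
        exact ⟨h1, h4, h3⟩
    · rintro ⟨h1, h2, h3⟩
      by_cases hsq : a * a ≤ n
      · left
        rw [pvSmall, List.mem_filter, PySem.List.mem_pyRange_one]
        simp only [Bool.and_eq_true, decide_eq_true_eq, beq_iff_eq, PySem.Int.mod_eq_zero_iff_dvd]
        exact ⟨⟨h1, by omega⟩, hsq, h3⟩
      · right
        rw [pvLarge, List.mem_map]
        set j := PySem.Int.floordiv n a with hj
        have hja : j * a = n := pvfd_mul (by omega) h3
        have hj1 : 1 ≤ j := by nlinarith
        have hjlt : j < a := by nlinarith
        have hjj : j * j ≤ n := by nlinarith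
        have hjdvd : j ∣ n := ⟨a, hja.symm⟩
        have hfdj : PySem.Int.floordiv n j = a := pvfd_eq (by omega) (by linarith [hja])
        refine ⟨j, ?_, hfdj⟩
        rw [List.mem_filter, PySem.List.mem_pyRange_one]
        simp only [Bool.and_eq_true, decide_eq_true_eq, beq_iff_eq, Bool.not_eq_true',
          beq_eq_false_iff_ne, ne_eq, PySem.Int.mod_eq_zero_iff_dvd]
        exact ⟨⟨hj1, by omega⟩, ⟨hjj, hjdvd⟩, by rw [hfdj]; omega⟩
  have hperm := (List.perm_ext_iff_of_nodup hnodupL hnodupR).mpr hmem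
  exact List.eq_of_perm_of_sorted (fun a b _ _ hab hba => absurd hba (not_lt.mpr hab.le)) hpairL hpairR hperm


theorem pvDivisorsAux_eq {n : Int} (hn : 1 ≤ n) : pvDivisorsAux n 1 [] [] = pvDlist n := by
  rw [pvDivisorsAux_inv n (n + 1 - 1).toNat 1 [] [] le_rfl le_rfl]
  simpa using pvdivs_eq n hn

-- the step function of PySem.List.min? with key = count (= A's strict-min update)
def pvStep (acc : Option (Int × Int × Int)) (x : Int × Int × Int) : Option (Int × Int × Int) :=
  match acc with
  | none => some x
  | some m => if x.2.2 < m.2.2 then some x else some m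

-- the candidate list contributed by one divisor k
def pvCand (length_unit width_unit input_channel output_channel n k : Int) : List (Int × Int × Int) :=
  (PySem.List.pyRange 1 (PySem.Int.floordiv n k + 1)).map
    (fun m => (k, m, pyCeilDiv input_channel (k * length_unit) * pyCeilDiv output_channel (m * width_unit)))

-- A's inner m-loop is the strict-min fold over the candidate list of k
theorem pvInnerA (length_unit width_unit core_number input_channel output_channel k : Int)
    (hk : 1 ≤ k) (hd : k ∣ core_number) (s : Option (Int × Int × Int)) :
    (PySem.List.pyRange 1 (pyCeilDiv core_number k + 1)).foldl (fun s m =>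
        let length := k * length_unit
        let width := m * width_unit
        let num_length := pyCeilDiv input_channel length
        let num_width := pyCeilDiv output_channel width
        let count := num_length * num_width
        match s with
        | none => some (k, m, count)
        | some (bl, bw, mc) => if count < mc then some (k, m, count) else some (bl, bw, mc)) s
    = (pvCand length_unit width_unit input_channel output_channel core_number k).foldl pvStep s := by
  rw [pvceil_eq_floordiv (by omega) hd, pvCand, List.foldl_map]
  apply PySem.List.foldl_congr_mem
  intro acc m _
  rcases acc with _ | ⟨⟨bl, bw, mc⟩⟩ <;> rfl

-- A's guarded outer k-loop over any list = strict-min fold over the flattened candidates of its divisors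
theorem pvA_fold (length_unit width_unit core_number input_channel output_channel : Int)
    (l : List Int) (hl : ∀ k ∈ l, 1 ≤ k) (s : Option (Int × Int × Int)) :
    l.foldl (fun s k =>
      if PySem.Int.mod core_number k == 0 then
        (PySem.List.pyRange 1 (pyCeilDiv core_number k + 1)).foldl (fun s m =>
          let length := k * length_unit
          let width := m * width_unit
          let num_length := pyCeilDiv input_channel length
          let num_width := pyCeilDiv output_channel width
          let count := num_length * num_width
          match s with
          | none => some (k, m, count)
          | some (bl, bw, mc) => if count < mc then some (k, m, count) else some (bl, bw, mc)) s
      else s) s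
    = ((l.filter (fun k => PySem.Int.mod core_number k == 0)).flatMap
        (pvCand length_unit width_unit input_channel output_channel core_number)).foldl pvStep s := by
  induction l generalizing s with
  | nil => rfl
  | cons k t ih =>
    simp only [List.foldl_cons, List.filter_cons]
    by_cases hdvd : (PySem.Int.mod core_number k == 0) = true
    · rw [if_pos hdvd, if_pos hdvd, List.flatMap_cons, List.foldl_append,
        pvInnerA _ _ _ _ _ _ (hl k List.mem_cons_self) ((PySem.Int.mod_eq_zero_iff_dvd _ _).mp (by simpa using hdvd))]
      exact ih (fun x hx => hl x (List.mem_cons_of_mem _ hx)) _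
    · rw [if_neg hdvd, if_neg hdvd]
      exact ih (fun x hx => hl x (List.mem_cons_of_mem _ hx)) s

theorem pvA_eq (length_unit width_unit core_number input_channel output_channel : Int) :
    find_optimal_rectangle_dimensions length_unit width_unit core_number input_channel output_channel
    = ((pvDlist core_number).flatMap
        (pvCand length_unit width_unit input_channel output_channel core_number)).foldl pvStep none :=
  pvA_fold length_unit width_unit core_number input_channel output_channel _
    (fun k hk => (PySem.List.mem_pyRange_one.mp hk).1) none

theorem pvB_eq (length_unit width_unit core_number input_channel output_channel : Int)
    (hn : 1 ≤ core_number) :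
    find_optimal_rectangle_dimensions_alt length_unit width_unit core_number input_channel output_channel
    = ((pvDlist core_number).flatMap
        (pvCand length_unit width_unit input_channel output_channel core_number)).foldl pvStep none := by
  unfold find_optimal_rectangle_dimensions_alt
  rw [if_neg (by omega)]
  show PySem.List.min? ((pvDivisorsAux core_number 1 [] []).flatMap _) _ = _
  rw [pvDivisorsAux_eq hn]
  unfold PySem.List.min?
  apply PySem.List.foldl_congr_mem
  intro acc x _
  rcases acc <;> rfl

-- ===== VERDICT (by name: the statement is the Claim_ definition above) =====
theorem find_optimal_rectangle_dimensions_spec : Claim_equal_find_optimal_rectangle_dimensions := by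
  intro length_unit width_unit core_number input_channel output_channel _ _
  unfold Spec_find_optimal_rectangle_dimensions
  by_cases hn : 1 ≤ core_number
  · rw [pvA_eq, pvB_eq _ _ _ _ _ hn]
  · unfold find_optimal_rectangle_dimensions find_optimal_rectangle_dimensions_alt
    rw [if_pos (by omega), PySem.List.pyRange_one_eq_nil (by omega)]
    rfl
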